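-- pv_equiv track=rewrite | github.com/hk918216/Programmers | 프로그래머스/Python/lv1/140108. 문자열 나누기/문자열 나누기.py | solution
-- ===== SOURCE A (Python) =====
-- def solution(s):
--     answer = 0
--     a = 0
--     b = 0
--     for i in s:
--         if a == b:
--             answer += 1
--             j = i
--         if j == i:
--             a += 1
--         else:
--             b += 1
--     return answer
-- ===== SOURCE B (Python) =====
-- def solution(s):
--     # Recursive decomposition: peel one segment per call. The segment's end is the
--     # first point where a signed walk (+1 on the anchor char, -1 otherwise) returns
--     # to zero; the rest of the string is handled by the recursive call on the suffix.
--     if not s: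
--         return 0
--     walk = 0
--     for k, c in enumerate(s):
--         walk += 1 if c == s[0] else -1
--         if walk == 0:
--             return 1 + solution(s[k + 1:])
--     return 1
-- ===== Notes on version B (the rewrite author's own statement) =====
-- stated objective: alternative
-- what changed: B replaces A's flat loop over two cumulative counters with an anchor reset flag by structural recursion: each call peels one segment, locating its end as the first zero of a single signed walk (+1 anchor / -1 other), and recurses on the sliced suffix.
import Mathlib
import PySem

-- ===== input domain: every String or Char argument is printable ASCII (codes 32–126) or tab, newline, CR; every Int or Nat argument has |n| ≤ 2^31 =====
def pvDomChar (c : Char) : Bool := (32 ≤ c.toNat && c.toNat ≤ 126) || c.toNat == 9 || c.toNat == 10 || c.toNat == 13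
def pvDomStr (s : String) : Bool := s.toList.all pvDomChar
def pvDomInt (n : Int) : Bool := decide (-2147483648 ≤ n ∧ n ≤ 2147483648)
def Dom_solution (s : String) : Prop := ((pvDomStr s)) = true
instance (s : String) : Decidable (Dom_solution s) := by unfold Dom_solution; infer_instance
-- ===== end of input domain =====

-- B replaces A's flat two-counter loop by structural recursion peeling one segment per call,
-- found as the first zero of a single signed walk; same return value, different decomposition.

-- ===== PORT A =====
-- one iteration of A's for-loop over state (answer, a, b, j)
def stepA (st : Int × Int × Int × Char) (c : Char) : Int × Int × Int × Char :=
  let ans := st.1; let a := st.2.1; let b := st.2.2.1; let j := st.2.2.2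
  let ans' := if a = b then ans + 1 else ans
  let j' := if a = b then c else j
  if j' = c then (ans', a + 1, b, j') else (ans', a, b + 1, j')

def solution (s : String) : Int :=
  -- j is uninitialised in Python before the first iteration; when a = b = 0 it is
  -- assigned before first use, so the initial ' ' is never read.
  (s.toList.foldl stepA (0, 0, 0, ' ')).1

-- ===== PORT B =====
-- B's inner for-loop: advance the signed walk; at the first zero return the suffix
-- after the cut (B's early return), none if the walk never returns to zero.
def cutB (anchor : Char) (walk : Int) : List Char → Option (List Char)
  | [] => none
  | c :: rest =>
    let w := walk + (if c = anchor then 1 else -1)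
    if w = 0 then some rest else cutB anchor w rest

lemma cutB_some_length (anchor : Char) :
    ∀ (l : List Char) (walk : Int) (suf : List Char),
      cutB anchor walk l = some suf → suf.length ≤ l.length := by
  intro l
  induction l with
  | nil => intro walk suf h; simp [cutB] at h
  | cons c rest ih =>
    intro walk suf h
    simp only [cutB] at h
    by_cases hz : walk + (if c = anchor then 1 else -1) = 0
    · rw [if_pos hz] at h; cases h; exact Nat.le_succ _
    · rw [if_neg hz] at h; exact le_trans (ih _ _ h) (Nat.le_succ _)

-- B's recursion: empty → 0; else the first char has walk 1 (never zero), so the cut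
-- search runs over the rest; 1 + recurse on the suffix, or 1 if no cut exists.
def goB : List Char → Int
  | [] => 0
  | c :: rest =>
    match h : cutB c 1 rest with
    | some suf => 1 + goB suf
    | none => 1
termination_by l => l.length
decreasing_by exact Nat.lt_succ_of_le (cutB_some_length c rest 1 suf h)

def solution_alt (s : String) : Int := goB s.toList

-- ===== PRECONDITION & SPEC =====
def Spec_solution (s : String) (out : Int) : Prop := out = solution_alt s
instance (s : String) (out : Int) : Decidable (Spec_solution s out) := by unfold Spec_solution; infer_instance

-- ===== CLAIM =====
def Claim_equal_solution : Prop := ∀ (s : String), Dom_solution s → Spec_solution s (solution s)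

-- ===== LEMMAS AND PROOFS =====

-- A's loop inside a segment (a ≠ b, anchor fixed) counts 1 + goB of the suffix after the
-- first zero of the walk (a - b), or nothing more if the walk never returns to zero.
lemma innerA (n : ℕ)
    (H : ∀ m : List Char, m.length ≤ n → ∀ (ans t : Int) (j : Char),
      (m.foldl stepA (ans, t, t, j)).1 = ans + goB m) :
    ∀ (l : List Char), l.length ≤ n → ∀ (a b : Int), a ≠ b →
      ∀ (ans : Int) (anchor : Char),
      (l.foldl stepA (ans, a, b, anchor)).1
        = ans + (match cutB anchor (a - b) l with
                 | some suf => goB suf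
                 | none => 0) := by
  intro l
  induction l with
  | nil => intro _ a b _ ans anchor; simp [cutB]
  | cons c rest ih =>
    intro hlen a b hne ans anchor
    have hlen' : rest.length ≤ n := le_trans (Nat.le_succ _) hlen
    by_cases hc : c = anchor
    · have hstep : stepA (ans, a, b, anchor) c = (ans, a + 1, b, anchor) := by
        simp [stepA, hne, hc.symm]
      rw [List.foldl_cons, hstep]
      simp only [cutB, if_pos hc]
      by_cases hz : a - b + 1 = 0
      · rw [if_pos hz]
        have hb : a + 1 = b := by omega
        rw [hb, H rest hlen' ans b anchor]
      · rw [if_neg hz]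
        rw [ih hlen' (a + 1) b (by omega) ans anchor,
            show a + 1 - b = a - b + 1 by ring]
    · have hc' : ¬ anchor = c := fun h => hc h.symm
      have hstep : stepA (ans, a, b, anchor) c = (ans, a, b + 1, anchor) := by
        simp [stepA, hne, hc']
      rw [List.foldl_cons, hstep]
      simp only [cutB, if_neg hc]
      by_cases hz : a - b + -1 = 0
      · rw [if_pos hz]
        have hb : a = b + 1 := by omega
        rw [hb, H rest hlen' ans (b + 1) anchor]
      · rw [if_neg hz]
        rw [ih hlen' a (b + 1) (by omega) ans anchor,
            show a - (b + 1) = a - b + -1 by ring]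

-- A's loop from a balanced state (a = b) computes goB
lemma outerA : ∀ (n : ℕ) (l : List Char), l.length ≤ n →
    ∀ (ans t : Int) (j : Char), (l.foldl stepA (ans, t, t, j)).1 = ans + goB l := by
  intro n
  induction n with
  | zero =>
    intro l hl ans t j
    have : l = [] := List.length_eq_zero_iff.mp (Nat.le_zero.mp hl)
    simp [this, goB]
  | succ n ih =>
    intro l hl ans t j
    cases l with
    | nil => simp [goB]
    | cons c rest =>
      have hlen' : rest.length ≤ n := by simpa using Nat.succ_le_succ_iff.mp hl
      have hstep : stepA (ans, t, t, j) c = (ans + 1, t + 1, t, c) := by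
        simp [stepA]
      have h := innerA n ih rest hlen' (t + 1) t (by omega) (ans + 1) c
      rw [List.foldl_cons, hstep, h, show t + 1 - t = 1 by ring]
      simp only [goB]
      cases hcut : cutB c 1 rest <;> simp only [hcut] <;> ring

-- ===== VERDICT =====
theorem solution_spec : Claim_equal_solution := by
  intro s _
  unfold Spec_solution solution solution_alt
  rw [outerA s.toList.length s.toList le_rfl 0 0 ' ']
  ring
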